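-- pv_equiv track=rewrite | github.com/mohammad-alkhateeb/Examples-of-complex-coding | Codility-Palladium-2020.py | solution
-- ===== SOURCE A (Python) =====
-- def solution(H):
--    s = max(H) * len(H)
--    sa = s
--    for i in range(1, len(H)):
--        d = (max(H[0:i]) * len(H[0:i])) + (max(H[i:]) * len(H[i:]))
--        if  d < sa:
--            sa = d
--    return sa
--    pass
-- ===== SOURCE B (Python) =====
-- def solution(H):
--     n = len(H)
--     # prefix running maxima: pref[k] = max(H[0:k+1])
--     pref = []
--     m = H[0]
--     for x in H:
--         if x > m:
--             m = x
--         pref.append(m)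
--     # suffix running maxima: suf[k] = max(H[k:])
--     suf = []
--     m = H[-1]
--     for x in reversed(H):
--         if x > m:
--             m = x
--         suf.append(m)
--     suf.reverse()
--     best = pref[n - 1] * n
--     for i in range(1, n):
--         d = pref[i - 1] * i + suf[i] * (n - i)
--         if d < best:
--             best = d
--     return best
-- ===== Notes on version B (the rewrite author's own statement) =====
-- stated objective: faster
-- what changed: B replaces A's per-split rescan of max(H[0:i]) and max(H[i:]) by one prefix-max scan and one suffix-max scan, evaluating every split in O(1).
-- outside the precondition, e.g. on solution([]): A raises ValueError, B raises IndexError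
import Mathlib
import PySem

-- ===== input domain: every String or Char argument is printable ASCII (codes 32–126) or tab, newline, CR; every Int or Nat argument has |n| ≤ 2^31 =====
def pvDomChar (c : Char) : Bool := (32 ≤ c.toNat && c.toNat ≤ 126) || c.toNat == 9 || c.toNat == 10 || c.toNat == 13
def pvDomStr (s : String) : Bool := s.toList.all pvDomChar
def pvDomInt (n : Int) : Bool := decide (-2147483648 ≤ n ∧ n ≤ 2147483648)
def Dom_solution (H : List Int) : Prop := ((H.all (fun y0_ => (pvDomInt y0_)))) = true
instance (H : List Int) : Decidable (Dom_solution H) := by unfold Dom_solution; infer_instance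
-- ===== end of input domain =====

-- B replaces A's quadratic rescan of every prefix/suffix by one prefix-max and one
-- suffix-max running scan, evaluating each split in O(1) (objective: faster, O(n^2) → O(n)).

-- ===== PORT A =====
-- max(l) for nonempty l (empty l is excluded by Pre_solution)
def pyMaxD (l : List Int) : Int := (PySem.List.max? l (fun y => y)).getD 0

def solution (H : List Int) : Int :=
  let n : Int := H.length
  let s := pyMaxD H * n
  (PySem.List.pyRange 1 n 1).foldl
    (fun sa i =>
      let pre := PySem.List.slice H (some 0) (some i)
      let suf := PySem.List.slice H (some i) none
      let d := pyMaxD pre * (pre.length : Int) + pyMaxD suf * (suf.length : Int)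
      if d < sa then d else sa) s

-- ===== PORT B =====
-- running-max scan: the Python loop `if x > m: m = x; out.append(m)`
def scanMax (m : Int) : List Int → List Int
  | [] => []
  | x :: t => let m' := if x > m then x else m
              m' :: scanMax m' t

def solution_alt (H : List Int) : Int :=
  let n : Int := H.length
  let pref := scanMax (H.headD 0) H
  let suf := (scanMax ((H.getLast?).getD 0) H.reverse).reverse
  let best := PySem.List.pyGetD pref (n - 1) 0 * n
  (PySem.List.pyRange 1 n 1).foldl
    (fun best i =>
      let d := PySem.List.pyGetD pref (i - 1) 0 * i + PySem.List.pyGetD suf i 0 * (n - i)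
      if d < best then d else best) best

-- ===== PRECONDITION & SPEC =====
-- Python A raises ValueError (max of empty sequence) on H = []; B raises IndexError there.
def Pre_solution (H : List Int) : Prop := H ≠ []
instance (H : List Int) : Decidable (Pre_solution H) := by unfold Pre_solution; infer_instance
def pvWitness_solution : List Int := [3, 1, 2]

def Spec_solution (H : List Int) (out : Int) : Prop := out = solution_alt H
instance (H : List Int) (out : Int) : Decidable (Spec_solution H out) := by unfold Spec_solution; infer_instance

-- ===== CLAIM (what is proved, stated in full; the proofs are below) =====
def Claim_equal_solution : Prop := ∀ (H : List Int), Dom_solution H → Pre_solution H → Spec_solution H (solution H)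

-- ===== LEMMAS AND PROOFS =====

theorem pyMaxD_cons (x : Int) (t : List Int) : pyMaxD (x :: t) = t.foldl max x := by
  simp [pyMaxD, PySem.List.max?_id_cons]

theorem foldl_max_comm (l : List Int) : ∀ (a b : Int), l.foldl max (max a b) = max (l.foldl max a) b := by
  induction l with
  | nil => intro a b; simp
  | cons x t ih =>
    intro a b
    simp only [List.foldl_cons]
    rw [show max (max a b) x = max (max a x) b by omega, ih]

theorem foldl_max_reverse (l : List Int) : ∀ (a : Int), l.reverse.foldl max a = l.foldl max a := by
  induction l with
  | nil => intro a; simp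
  | cons x t ih =>
    intro a
    simp only [List.reverse_cons, List.foldl_append, List.foldl_cons, List.foldl_nil]
    rw [ih, ← foldl_max_comm]

theorem foldl_max_of_mem (l : List Int) (a : Int) (h : a ∈ l) : l.foldl max a = pyMaxD l := by
  obtain ⟨x, t, rfl⟩ : ∃ x t, l = x :: t := by
    cases l with
    | nil => simp at h
    | cons x t => exact ⟨x, t, rfl⟩
  rw [pyMaxD_cons]
  have hu := PySem.List.foldl_max_mem t (max a x)
  have hv := PySem.List.foldl_max_mem t x
  have hlu := PySem.List.le_foldl_max t (max a x)
  have hlv := PySem.List.le_foldl_max t x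
  simp only [List.foldl_cons]
  apply le_antisymm
  · rcases hu with h1 | h1
    · -- foldl = max a x ; both a and x are ≤ RHS
      rw [h1]
      rcases List.mem_cons.mp h with rfl | ha
      · simpa using hlv.1
      · exact max_le (hlv.2 a ha) hlv.1
    · rw [show t.foldl max x = max (t.foldl max x) (t.foldl max (max a x)) from
        (max_eq_left (hlv.2 _ h1)).symm]
      exact le_max_right _ _
  · rcases hv with h1 | h1
    · rw [h1]; exact le_trans (le_max_right a x) hlu.1
    · exact hlu.2 _ h1

theorem length_scanMax (m : Int) (l : List Int) : (scanMax m l).length = l.length := by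
  induction l generalizing m with
  | nil => rfl
  | cons x t ih => simp [scanMax, ih]

theorem scanMax_getD (t : List Int) : ∀ (m : Int) (k : Nat), k < t.length →
    (scanMax m t).getD k 0 = (t.take (k + 1)).foldl max m := by
  induction t with
  | nil => intro m k hk; simp at hk
  | cons x t ih =>
    intro m k hk
    have hm : (if x > m then x else m) = max m x := by
      by_cases h : x > m <;> simp [h] <;> omega
    cases k with
    | zero => simp [scanMax, hm]
    | succ k =>
      simp only [scanMax, List.getD_cons_succ, List.take_succ_cons, List.foldl_cons, hm]
      exact ih (max m x) k (by simpa using hk)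

theorem pref_getD (H : List Int) (hne : H ≠ []) (k : Nat) (hk : k < H.length) :
    (scanMax (H.headD 0) H).getD k 0 = pyMaxD (H.take (k + 1)) := by
  obtain ⟨x, t, rfl⟩ : ∃ x t, H = x :: t := by
    cases H with
    | nil => exact absurd rfl hne
    | cons x t => exact ⟨x, t, rfl⟩
  rw [scanMax_getD _ _ _ hk]
  apply foldl_max_of_mem
  simp

theorem suf_getD (H : List Int) (hne : H ≠ []) (k : Nat) (hk : k < H.length) :
    ((scanMax ((H.getLast?).getD 0) H.reverse).reverse).getD k 0 = pyMaxD (H.drop k) := by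
  have hlen : (scanMax ((H.getLast?).getD 0) H.reverse).length = H.length := by
    rw [length_scanMax, List.length_reverse]
  set L := scanMax ((H.getLast?).getD 0) H.reverse with hL
  have hk' : k < L.reverse.length := by simp [hlen, hk]
  rw [List.getD_eq_getElem L.reverse 0 hk', List.getElem_reverse]
  have hk2 : L.length - 1 - k < H.reverse.length := by
    simp only [List.length_reverse]; omega
  have := scanMax_getD H.reverse ((H.getLast?).getD 0) (L.length - 1 - k) (by simpa using hk2)
  rw [← hL] at this
  rw [← List.getD_eq_getElem L 0 (by omega), this]
  have htk : H.reverse.take (L.length - 1 - k + 1) = (H.drop k).reverse := by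
    have h1 : L.length - 1 - k + 1 = H.length - k := by omega
    rw [h1, List.take_reverse]
    congr 2
    omega
  rw [htk, foldl_max_reverse]
  apply foldl_max_of_mem
  have hdne : H.drop k ≠ [] := by
    intro h
    have := congrArg List.length h
    simp at this
    omega
  have heq : (H.getLast?).getD 0 = (H.drop k).getLast hdne := by
    rw [List.getLast_drop hdne, List.getLast?_eq_some_getLast hne, Option.getD_some]
  rw [heq]
  exact List.getLast_mem hdne

-- ===== VERDICT (by name: the statement is the Claim_ definition above) =====
theorem solution_spec : Claim_equal_solution := by
  intro H _ hne
  unfold Spec_solution solution solution_alt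
  have hlen : 0 < H.length := List.length_pos_iff.mpr hne
  -- initial accumulators agree
  have hinit : PySem.List.pyGetD (scanMax (H.headD 0) H) ((H.length : Int) - 1) 0 * (H.length : Int)
      = pyMaxD H * (H.length : Int) := by
    have h1 : ((H.length : Int) - 1) = ((H.length - 1 : Nat) : Int) := by omega
    rw [h1, PySem.List.pyGetD_natCast]
    rw [pref_getD H hne (H.length - 1) (by omega)]
    have : H.length - 1 + 1 = H.length := by omega
    rw [this, List.take_length]
  simp only []
  rw [hinit]
  apply PySem.List.foldl_congr_mem
  intro sa i hi
  have hmem := (PySem.List.mem_pyRange_one).mp hi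
  obtain ⟨h1i, hin⟩ := hmem
  have h0i : 0 ≤ i := by omega
  obtain ⟨k, rfl⟩ : ∃ k : Nat, i = (k : Int) := ⟨i.toNat, (Int.toNat_of_nonneg h0i).symm⟩
  have hk1 : 1 ≤ k := by exact_mod_cast h1i
  have hkn : k < H.length := by exact_mod_cast hin
  -- A's slices
  have hpre : PySem.List.slice H (some 0) (some (k : Int)) = H.take k := by
    rw [show ((0 : Int)) = ((0 : Nat) : Int) by rfl, PySem.List.slice_natCast]
    simp
  have hsuf : PySem.List.slice H (some (k : Int)) none = H.drop k := by
    rw [PySem.List.slice_from_natCast]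
  rw [hpre, hsuf]
  -- B's indexing
  have hbpre : PySem.List.pyGetD (scanMax (H.headD 0) H) ((k : Int) - 1) 0 = pyMaxD (H.take k) := by
    have h1 : ((k : Int) - 1) = ((k - 1 : Nat) : Int) := by push_cast [Nat.cast_sub hk1]; ring
    have hk' : k - 1 + 1 = k := by omega
    rw [h1, PySem.List.pyGetD_natCast, pref_getD H hne (k - 1) (by omega), hk']
  have hbsuf : PySem.List.pyGetD ((scanMax ((H.getLast?).getD 0) H.reverse).reverse) (k : Int) 0
      = pyMaxD (H.drop k) := by
    rw [PySem.List.pyGetD_natCast, suf_getD H hne k hkn]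
  rw [hbpre, hbsuf]
  have hltake : ((H.take k).length : Int) = (k : Int) := by
    simp [List.length_take]; omega
  have hldrop : ((H.drop k).length : Int) = (H.length : Int) - (k : Int) := by
    simp [List.length_drop]; omega
  rw [hltake, hldrop]
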